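-- pv_equiv track=rewrite | github.com/pypi-data/pypi-mirror-386 | packages/dektools/dektools-0.4.79-py3-none-any.whl/dektools/web/headers.py | _parse_header
-- ===== SOURCE A (Python) =====
-- def _parseparam(s):
--     while s[:1] == ';':
--         s = s[1:]
--         end = s.find(';')
--         while end > 0 and (s.count('"', 0, end) - s.count('\\"', 0, end)) % 2:
--             end = s.find(';', end + 1)
--         if end < 0:
--             end = len(s)
--         f = s[:end]
--         yield f.strip()
--         s = s[end:]
--
-- def _parse_header(line):  # source:cgi.parse_header, https://github.com/python/cpython/issues/91217
--     """Parse a Content-type like header.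
--
--     Return the main content-type and a dictionary of options.
--
--     """
--     parts = _parseparam(';' + line)
--     key = parts.__next__()
--     pdict = {}
--     for p in parts:
--         i = p.find('=')
--         if i >= 0:
--             name = p[:i].strip().lower()
--             value = p[i + 1:].strip()
--             if len(value) >= 2 and value[0] == value[-1] == '"':
--                 value = value[1:-1]
--                 value = value.replace('\\\\', '\\').replace('\\"', '"')
--             pdict[name] = value
--     return key, pdict
-- ===== SOURCE B (Python) =====
-- def _parse_header(line):
--     # Single-pass scanner: split `line` at top-level ';' (quote-aware, backslash
--     # escapes) instead of A's repeated find/count passes; then read the options.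
--     tokens = []
--     cur = []
--     in_q = False
--     prev = ''
--     for ch in line:
--         if ch == '"' and prev != '\\':
--             in_q = not in_q
--             cur.append(ch)
--         elif ch == ';' and not in_q:
--             tokens.append(''.join(cur).strip())
--             cur = []
--         else:
--             cur.append(ch)
--         prev = ch
--     tokens.append(''.join(cur).strip())
--     key = tokens[0]
--     pdict = {}
--     for p in tokens[1:]:
--         i = p.find('=')
--         if i >= 0:
--             name = p[:i].strip().lower()
--             value = p[i + 1:].strip()
--             if len(value) >= 2 and value[0] == value[-1] == '"':
--                 value = value[1:-1]
--                 value = value.replace('\\\\', '\\').replace('\\"', '"')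
--             pdict[name] = value
--     return key, pdict
-- ===== Notes on version B (the rewrite author's own statement) =====
-- stated objective: alternative
-- what changed: A's generator repeatedly calls find for the next semicolon and re-counts quote and backslash-quote occurrences over a growing prefix to decide whether that semicolon is inside a quoted section; B makes one character-by-character pass keeping an in-quote flag (toggled by any double quote not preceded by a backslash) and splits at each semicolon seen outside quotes, then reads the options from the token list exactly as A does.
import Mathlib
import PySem

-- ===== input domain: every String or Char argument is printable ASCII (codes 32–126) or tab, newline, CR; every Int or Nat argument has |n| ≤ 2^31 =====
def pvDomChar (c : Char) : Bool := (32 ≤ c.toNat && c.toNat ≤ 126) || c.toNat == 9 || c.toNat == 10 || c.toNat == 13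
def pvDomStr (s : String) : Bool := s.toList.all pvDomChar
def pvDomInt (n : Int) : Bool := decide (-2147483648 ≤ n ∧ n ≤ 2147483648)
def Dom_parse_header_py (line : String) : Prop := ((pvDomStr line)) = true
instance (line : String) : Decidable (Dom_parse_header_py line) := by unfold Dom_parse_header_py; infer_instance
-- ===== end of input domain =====

-- B replaces A's repeated find/count passes by one quote-aware character scan; same options parsing.

-- ===== PORT A =====
-- inner `while end > 0 and (s.count('"',0,end)-s.count('\\"',0,end)) % 2` loop of _parseparam;
-- str.count(sub, 0, end) is ported exactly as PySem.Chars.count over the slice s[0:end];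
-- s.find advances strictly each turn, so fuel s.length+1 is enough (proved in the lemmas below).
def pvInnerA (s : List Char) : Nat → Int → Int
  | 0, e => e
  | fuel+1, e =>
    if e > 0 ∧ PySem.Int.mod ((PySem.Chars.count (PySem.List.slice s (some 0) (some e)) ['"'] : Int)
        - (PySem.Chars.count (PySem.List.slice s (some 0) (some e)) ['\\', '"'] : Int)) 2 ≠ 0 then
      pvInnerA s fuel (PySem.Chars.findFrom s [';'] (e + 1) none)
    else e

-- the generator _parseparam, as the list of the values it yields
def pvParseparamA (s : List Char) : List (List Char) :=
  if PySem.List.slice s none (some 1) = [';'] then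
    let s1 := PySem.List.slice s (some 1) none
    let e0 := PySem.Chars.find s1 [';']
    let e1 := pvInnerA s1 (s1.length + 1) e0
    let e2 := if e1 < 0 then (s1.length : Int) else e1
    PySem.Chars.strip (PySem.List.slice s1 none (some e2)) ::
      pvParseparamA (PySem.List.slice s1 (some e2) none)
  else []
termination_by s.length
decreasing_by
  rename_i h
  have hs : s ≠ [] := by intro hnil; subst hnil; simp [PySem.List.slice] at h
  rw [PySem.List.slice_some_none, PySem.List.slice_from_one]
  simp only [List.length_drop]
  cases s with
  | nil => exact absurd rfl hs
  | cons a t => simp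

-- the `for p in parts:` option loop of _parse_header
def pvOptsA (ps : List (List Char)) : PySem.Dict String String :=
  ps.foldl (fun d p =>
    let i := PySem.Chars.find p ['=']
    if i ≥ 0 then
      let name := PySem.Chars.lower (PySem.Chars.strip (PySem.List.slice p none (some i)))
      let value := PySem.Chars.strip (PySem.List.slice p (some (i + 1)) none)
      let value :=
        if 2 ≤ value.length ∧ PySem.List.pyGet? value 0 = PySem.List.pyGet? value (-1)
            ∧ PySem.List.pyGet? value (-1) = some '"' then
          PySem.Chars.replace (PySem.Chars.replace (PySem.List.slice value (some 1) (some (-1)))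
            ['\\', '\\'] ['\\']) ['\\', '"'] ['"']
        else value
      d.insert (String.ofList name) (String.ofList value)
    else d) PySem.Dict.empty

def parse_header_py (line : String) : String × (List (String × String)) :=
  match pvParseparamA (';' :: line.toList) with
  | [] => ("", [])   -- unreachable: _parseparam(';'+line) always yields at least one part
  | key :: rest => (String.ofList key, (pvOptsA rest).items)

-- ===== PORT B =====
-- single-pass scanner: cur is the current token (reversed), prev the previous character (as a 1-char
-- string, '' initially), inq whether we are inside double quotes
def pvScanB : List Char → Bool → List Char → List Char → List (List Char)
  | [], _, _, cur => [PySem.Chars.strip cur.reverse]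
  | c :: rest, inq, prev, cur =>
    if c = '"' ∧ prev ≠ ['\\'] then pvScanB rest (!inq) [c] (c :: cur)
    else if c = ';' ∧ inq = false then
      PySem.Chars.strip cur.reverse :: pvScanB rest inq [c] []
    else pvScanB rest inq [c] (c :: cur)

-- the `for p in tokens[1:]:` option loop of B (same reading of options as A)
def pvOptsB (ps : List (List Char)) : PySem.Dict String String :=
  ps.foldl (fun d p =>
    let i := PySem.Chars.find p ['=']
    if i ≥ 0 then
      let name := PySem.Chars.lower (PySem.Chars.strip (PySem.List.slice p none (some i)))
      let value := PySem.Chars.strip (PySem.List.slice p (some (i + 1)) none)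
      let value :=
        if 2 ≤ value.length ∧ PySem.List.pyGet? value 0 = PySem.List.pyGet? value (-1)
            ∧ PySem.List.pyGet? value (-1) = some '"' then
          PySem.Chars.replace (PySem.Chars.replace (PySem.List.slice value (some 1) (some (-1)))
            ['\\', '\\'] ['\\']) ['\\', '"'] ['"']
        else value
      d.insert (String.ofList name) (String.ofList value)
    else d) PySem.Dict.empty

def parse_header_py_alt (line : String) : String × (List (String × String)) :=
  match pvScanB line.toList false [] [] with
  | [] => ("", [])   -- unreachable: the scanner always emits at least one token
  | key :: rest => (String.ofList key, (pvOptsB rest).items)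

-- ===== PRECONDITION & SPEC =====
def Spec_parse_header_py (line : String) (out : String × (List (String × String))) : Prop := out = parse_header_py_alt line
instance (line : String) (out : String × (List (String × String))) : Decidable (Spec_parse_header_py line out) := by unfold Spec_parse_header_py; infer_instance

-- ===== CLAIM (what is proved, stated in full; the proofs are below) =====
def Claim_equal_parse_header_py : Prop := ∀ (line : String), Dom_parse_header_py line → Spec_parse_header_py line (parse_header_py line)


-- ===== LEMMAS AND PROOFS =====

-- count of unescaped double quotes (esc = "previous char was a backslash")
def pvU : List Char → Bool → Nat
  | [], _ => 0
  | c :: t, esc => (if c = '"' ∧ esc = false then 1 else 0) + pvU t (decide (c = '\\'))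

-- non-overlapping occurrences of the two-char pattern \" (what s.count('\\"') counts)
def pvE : List Char → Nat
  | '\\' :: '"' :: t => pvE t + 1
  | _ :: t => pvE t
  | [] => 0

-- index of the first token-splitting ';' in the scanner's state machine
def pvFvS : List Char → Bool → Bool → Option Nat
  | [], _, _ => none
  | c :: t, inq, esc =>
    if c = '"' ∧ esc = false then (pvFvS t (!inq) (decide (c = '\\'))).map (· + 1)
    else if c = ';' ∧ inq = false then some 0
    else (pvFvS t inq (decide (c = '\\'))).map (· + 1)

-- first index ≥ k holding ';' preceded (from 0) by evenly many unescaped quotes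
def pvFvK (l : List Char) (k : Nat) : Option Nat :=
  if h : k < l.length then
    if l[k] = ';' ∧ pvU (l.take k) false % 2 = 0 then some k else pvFvK l (k + 1)
  else none
termination_by l.length - k

def pvEscAfter (a : List Char) (esc : Bool) : Bool :=
  match a.getLast? with
  | none => esc
  | some c => decide (c = '\\')

lemma pvFvS_lt {l : List Char} {inq esc : Bool} {i : Nat} (h : pvFvS l inq esc = some i) :
    i < l.length := by
  induction l generalizing inq esc i with
  | nil => simp [pvFvS] at h
  | cons c t ih =>
    simp only [pvFvS] at h
    split_ifs at h with h1 h2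
    · obtain ⟨j, hj, rfl⟩ := Option.map_eq_some_iff.mp h
      have := ih hj; simp; omega
    · cases h; simp
    · obtain ⟨j, hj, rfl⟩ := Option.map_eq_some_iff.mp h
      have := ih hj; simp; omega

-- the token list both programs produce, defined from the first-cut function
def pvTokens (l : List Char) : List (List Char) :=
  match h : pvFvS l false false with
  | none => [PySem.Chars.strip l]
  | some i => PySem.Chars.strip (l.take i) :: pvTokens (l.drop (i + 1))
termination_by l.length
decreasing_by have := pvFvS_lt h; simp [List.length_drop]; omega

lemma pvCountGoQ : ∀ (fuel : Nat) (l : List Char) (acc : Nat), l.length ≤ fuel →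
    PySem.Chars.count.go ['"'] fuel l acc = acc + l.count '"' := by
  intro fuel
  induction fuel with
  | zero =>
    intro l acc h
    have : l = [] := by cases l <;> simp_all
    subst this; simp [PySem.Chars.count.go]
  | succ f ih =>
    intro l acc h
    cases l with
    | nil => simp [PySem.Chars.count.go]
    | cons c t =>
      simp only [PySem.Chars.count.go]
      by_cases hc : c = '"'
      · subst hc
        rw [if_pos (by simp [List.isPrefixOf])]
        rw [ih _ _ (by simpa using h)]
        simp [List.count_cons]; omega
      · rw [if_neg (by simp [List.isPrefixOf, Ne.symm hc])]
        rw [ih _ _ (by simpa using h)]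
        simp [List.count_cons, hc]

lemma pvCountGoE : ∀ (fuel : Nat) (l : List Char) (acc : Nat), l.length ≤ fuel →
    PySem.Chars.count.go ['\\', '"'] fuel l acc = acc + pvE l := by
  intro fuel
  induction fuel with
  | zero =>
    intro l acc h
    have : l = [] := by cases l <;> simp_all
    subst this; simp [PySem.Chars.count.go, pvE]
  | succ f ih =>
    intro l acc h
    cases l with
    | nil => simp [PySem.Chars.count.go, pvE]
    | cons c t =>
      simp only [PySem.Chars.count.go]
      by_cases hc : c = '\\'
      · subst hc
        cases t with
        | nil =>
          rw [if_neg (by simp [List.isPrefixOf])]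
          rw [ih _ _ (by simp)]
          simp [pvE]
        | cons d r =>
          by_cases hd : d = '"'
          · subst hd
            rw [if_pos (by simp [List.isPrefixOf])]
            rw [ih _ _ (by simp at h ⊢; omega)]
            simp [pvE]; omega
          · rw [if_neg (by simp [List.isPrefixOf, Ne.symm hd])]
            rw [ih _ _ (by simpa using h)]
            simp [pvE, hd]
      · rw [if_neg (by simp [List.isPrefixOf, Ne.symm hc])]
        rw [ih _ _ (by simpa using h)]
        cases t <;> simp [pvE, hc]

lemma pvU_of_head_ne : ∀ (t : List Char) (b b' : Bool), (∀ hd, t.head? = some hd → hd ≠ '"') →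
    pvU t b = pvU t b' := by
  intro t b b' h
  cases t with
  | nil => rfl
  | cons c r => have hc : c ≠ '"' := h c rfl; simp [pvU, hc]

lemma pvP3 : ∀ l : List Char, l.count '"' = pvE l + pvU l false := by
  intro l
  induction l using pvE.induct with
  | case1 t ih =>
    simp [pvE, pvU, List.count_cons, ih]
    omega
  | case2 c t hne ih =>
    by_cases hc : c = '\\'
    · subst hc
      cases t with
      | nil => simp [pvE, pvU]
      | cons d r =>
        have hd : d ≠ '"' := fun h => hne r rfl (by rw [h])
        have hE : pvE ('\\' :: d :: r) = pvE (d :: r) := by simp [pvE, hd]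
        have hU1 : pvU ('\\' :: d :: r) false = pvU (d :: r) true := by simp [pvU]
        have hU : pvU (d :: r) true = pvU (d :: r) false :=
          pvU_of_head_ne _ _ _ (by intro hd' h'; cases h'; exact hd)
        rw [hE, hU1, hU]
        simp [List.count_cons, hd, ih]
    · have hcq : decide (c = '\\') = false := by simp [hc]
      have hE : pvE (c :: t) = pvE t := by
        cases t with
        | nil => simp [pvE, hc]
        | cons d r => simp [pvE, hc]
      have hU1 : pvU (c :: t) false = (if c = '"' then 1 else 0) + pvU t false := by
        simp [pvU, hcq]
      rw [hE, hU1]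
      by_cases hq : c = '"' <;> simp [List.count_cons, hq, ih] <;> omega
  | case3 => simp [pvE, pvU]

lemma pvCount_sub (l : List Char) :
    (PySem.Chars.count l ['"'] : Int) - PySem.Chars.count l ['\\', '"'] = pvU l false := by
  have hq := pvCountGoQ l.length l 0 le_rfl
  have he := pvCountGoE l.length l 0 le_rfl
  have h3 := pvP3 l
  simp only [PySem.Chars.count, List.isEmpty_cons, if_neg Bool.false_ne_true]
  rw [hq, he]
  omega

lemma pvParity (l : List Char) (e : Int) (he : 0 ≤ e) :
    ((PySem.Int.mod ((PySem.Chars.count (PySem.List.slice l (some 0) (some e)) ['"'] : Int)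
      - (PySem.Chars.count (PySem.List.slice l (some 0) (some e)) ['\\', '"'] : Int)) 2 ≠ 0)
      ↔ pvU (l.take e.toNat) false % 2 = 1) := by
  rw [PySem.List.slice_zero_start, PySem.List.slice_to l he, pvCount_sub]
  have h2 : PySem.Int.mod ((pvU (l.take e.toNat) false : Nat) : Int) 2
      = ((pvU (l.take e.toNat) false % 2 : Nat) : Int) := by
    exact_mod_cast PySem.Int.mod_natCast _ 2
  rw [h2]
  omega

lemma pvSemiPrefix (t : List Char) : [';'] <+: t ↔ t.head? = some ';' := by
  cases t <;> simp [List.cons_prefix_cons, eq_comm]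

lemma pvFvK_stop (l : List Char) (k : Nat) (h : ¬ k < l.length) : pvFvK l k = none := by
  rw [pvFvK]; simp [h]

lemma pvFvK_skip (l : List Char) : ∀ (d k : Nat), k + d ≤ l.length →
    (∀ i, k ≤ i → i < k + d → l[i]? ≠ some ';') → pvFvK l k = pvFvK l (k + d) := by
  intro d
  induction d with
  | zero => intro k _ _; rfl
  | succ n ih =>
    intro k hk h
    have hkl : k < l.length := by omega
    have hne : l[k] ≠ ';' := by
      have := h k le_rfl (by omega)
      simpa [List.getElem?_eq_getElem hkl] using this
    rw [pvFvK, dif_pos hkl, if_neg (by tauto)]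
    have := ih (k + 1) (by omega) (fun i h1 h2 => h i (by omega) (by omega))
    rw [this]
    congr 1
    omega

lemma pvFvK_some (l : List Char) : ∀ (k i : Nat), pvFvK l k = some i →
    k ≤ i ∧ i < l.length ∧ l[i]? = some ';' ∧ pvU (l.take i) false % 2 = 0 := by
  intro k
  induction hn : l.length - k using Nat.strong_induction_on generalizing k with
  | _ n ih =>
    intro i h
    rw [pvFvK] at h
    split_ifs at h with h1 h2
    · cases h
      exact ⟨le_rfl, h1, by simp [List.getElem?_eq_getElem h1, h2.1], h2.2⟩
    · obtain ⟨ha, hb, hc, hd⟩ := ih (l.length - (k + 1)) (by omega) (k + 1) rfl i h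
      exact ⟨by omega, hb, hc, hd⟩

lemma pvNoSemi (l : List Char) (k : Nat) (h : ¬ [';'] <:+: l.drop k) :
    ∀ i, k ≤ i → l[i]? ≠ some ';' := by
  intro i hki hi
  apply h
  rw [List.singleton_infix_iff]
  have hil : i < l.length := (List.getElem?_eq_some_iff.mp hi).1
  have : l[i] = ';' := by simpa [List.getElem?_eq_getElem hil] using hi
  rw [← this]
  have : l[i] = (l.drop k)[i - k]'(by simp; omega) := by
    simp [List.getElem_drop]; congr 1; omega
  rw [this]
  exact List.getElem_mem _

lemma pvInnerA_spec (l : List Char) : ∀ (fuel k : Nat), k ≤ l.length → l.length - k < fuel →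
    pvInnerA l fuel (PySem.Chars.findFrom l [';'] (k : Int) none) =
      (match pvFvK l k with | none => (-1 : Int) | some i => (i : Int)) := by
  intro fuel
  induction fuel with
  | zero => intro k hk hf; omega
  | succ f ih =>
    intro k hk hf
    rw [PySem.Chars.findFrom_natCast l [';'] k hk]
    by_cases hneg : PySem.Chars.find (l.drop k) [';'] = -1
    · rw [if_pos hneg]
      have hnone : pvFvK l k = none := by
        have hns := pvNoSemi l k ((PySem.Chars.find_eq_neg_one_iff _ _).mp hneg)
        have := pvFvK_skip l (l.length - k) k (by omega)
          (fun i h1 _ => hns i h1)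
        rw [this, pvFvK_stop l (k + (l.length - k)) (by omega)]
      rw [hnone]
      simp [pvInnerA]
    · have hge : 0 ≤ PySem.Chars.find (l.drop k) [';'] := by
        have := PySem.Chars.neg_one_le_find (l.drop k) [';']
        omega
      set m := (PySem.Chars.find (l.drop k) [';']).toNat with hm
      have hfind : PySem.Chars.find (l.drop k) [';'] = (m : Int) := by omega
      obtain ⟨hpre, hmin⟩ := PySem.Chars.find_spec hge
      rw [List.drop_drop] at hpre
      have hsem : l[k + m]? = some ';' := by
        rw [← List.head?_drop]
        exact (pvSemiPrefix _).mp hpre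
      have hlt : k + m < l.length := (List.getElem?_eq_some_iff.mp hsem).1
      have hskip : pvFvK l k = pvFvK l (k + m) := by
        apply pvFvK_skip l m k (by omega)
        intro i h1 h2 hi
        apply hmin (i - k) (by omega)
        rw [List.drop_drop, show k + (i - k) = i from by omega, pvSemiPrefix, List.head?_drop]
        exact hi
      have hif : (if PySem.Chars.find (l.drop k) [';'] = -1 then (-1 : Int)
          else (k : Int) + PySem.Chars.find (l.drop k) [';']) = ((k + m : Nat) : Int) := by
        rw [if_neg hneg, hfind]; push_cast; ring
      rw [hif]
      have hget : l[k + m] = ';' := by simpa [List.getElem?_eq_getElem hlt] using hsem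
      by_cases hp : pvU (l.take (k + m)) false % 2 = 1
      · have hK0 : k + m ≠ 0 := by
          intro h0
          rw [h0] at hp
          simp [pvU] at hp
        rw [pvInnerA]
        rw [if_pos ⟨by exact_mod_cast Nat.pos_of_ne_zero hK0,
          by rw [pvParity l _ (by positivity)]; simpa using hp⟩]
        have hcast : ((k + m : Nat) : Int) + 1 = ((k + m + 1 : Nat) : Int) := by push_cast; ring
        rw [hcast, ih (k + m + 1) (by omega) (by omega)]
        rw [hskip]
        have : pvFvK l (k + m) = pvFvK l (k + m + 1) := by
          rw [pvFvK, dif_pos hlt, if_neg (by intro hcon; omega)]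
        rw [this]
      · rw [pvInnerA]
        rw [if_neg (by
          intro hcon
          have := (pvParity l _ (by positivity)).mp hcon.2
          simp at this
          exact hp this)]
        rw [hskip]
        rw [pvFvK, dif_pos hlt, if_pos ⟨hget, by omega⟩]

lemma pvEscAfter_cons (c : Char) (a : List Char) (e : Bool) :
    pvEscAfter (c :: a) e = pvEscAfter a (decide (c = '\\')) := by
  cases a with
  | nil => simp [pvEscAfter]
  | cons d r =>
    unfold pvEscAfter
    rw [List.getLast?_cons_cons]
    cases h : (d :: r).getLast? with
    | none => simp at h
    | some x => rfl

lemma pvU_append : ∀ (a b : List Char) (e : Bool),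
    pvU (a ++ b) e = pvU a e + pvU b (pvEscAfter a e) := by
  intro a
  induction a with
  | nil => intro b e; simp [pvU, pvEscAfter]
  | cons c a' ih =>
    intro b e
    simp only [List.cons_append, pvU, ih, pvEscAfter_cons]
    omega

lemma pvFvS_eq_fvK : ∀ (t pre : List Char),
    (pvFvS t (decide (pvU pre false % 2 = 1)) (pvEscAfter pre false)).map (· + pre.length)
      = pvFvK (pre ++ t) pre.length := by
  intro t
  induction t with
  | nil =>
    intro pre
    rw [List.append_nil, pvFvK_stop pre pre.length (by omega)]
    simp [pvFvS]
  | cons c r ih =>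
    intro pre
    have hk : pre.length < (pre ++ c :: r).length := by simp
    have hget : (pre ++ c :: r)[pre.length]'hk = c := List.getElem_of_append rfl rfl
    have htake : (pre ++ c :: r).take pre.length = pre := by simp
    have hassoc : pre ++ c :: r = (pre ++ [c]) ++ r := by simp
    have hlen1 : pre.length + 1 = (pre ++ [c]).length := by simp
    have hEsc : pvEscAfter (pre ++ [c]) false = decide (c = '\\') := by
      simp [pvEscAfter, List.getLast?_concat]
    have hU1 : pvU (pre ++ [c]) false
        = pvU pre false + (if c = '"' ∧ pvEscAfter pre false = false then 1 else 0) := by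
      rw [pvU_append]; simp [pvU]
    have hmap : ∀ (o : Option Nat), (o.map (· + 1)).map (· + pre.length)
        = o.map (· + (pre ++ [c]).length) := by
      intro o; cases o <;> simp <;> omega
    rw [pvFvK, dif_pos hk]
    simp only [htake, hget]
    by_cases h1 : c = '"' ∧ pvEscAfter pre false = false
    · obtain ⟨hq, hesc⟩ := h1
      rw [show pvFvS (c :: r) (decide (pvU pre false % 2 = 1)) (pvEscAfter pre false)
          = (pvFvS r (!decide (pvU pre false % 2 = 1)) (decide (c = '\\'))).map (· + 1) from by
        simp only [pvFvS]; rw [if_pos ⟨hq, hesc⟩]]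
      have hU2 : pvU (pre ++ [c]) false = pvU pre false + 1 := by rw [hU1]; simp [hq, hesc]
      have hinq : decide (pvU (pre ++ [c]) false % 2 = 1) = !decide (pvU pre false % 2 = 1) := by
        rcases Nat.mod_two_eq_zero_or_one (pvU pre false) with h | h <;>
          simp [hU2, Nat.add_mod, h]
      have hcne : ¬(c = ';' ∧ pvU pre false % 2 = 0) := by
        rintro ⟨h', -⟩; rw [hq] at h'; exact absurd h' (by decide)
      rw [if_neg hcne, hmap, hassoc, hlen1]
      have hih := ih (pre ++ [c])
      rw [hinq, hEsc] at hih
      exact hih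
    · by_cases h2 : c = ';' ∧ (decide (pvU pre false % 2 = 1)) = false
      · have hz : pvU pre false % 2 = 0 := by
          have h22 := h2.2
          rcases Nat.mod_two_eq_zero_or_one (pvU pre false) with h | h
          · exact h
          · simp [h] at h22
        rw [show pvFvS (c :: r) (decide (pvU pre false % 2 = 1)) (pvEscAfter pre false)
            = some 0 from by
          simp only [pvFvS]; rw [if_neg h1, if_pos h2]]
        rw [if_pos ⟨h2.1, hz⟩]
        simp
      · have hcond : ¬(c = ';' ∧ pvU pre false % 2 = 0) := by
          rintro ⟨hc', hp⟩
          exact h2 ⟨hc', by simp [hp]⟩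
        rw [show pvFvS (c :: r) (decide (pvU pre false % 2 = 1)) (pvEscAfter pre false)
            = (pvFvS r (decide (pvU pre false % 2 = 1)) (decide (c = '\\'))).map (· + 1) from by
          simp only [pvFvS]; rw [if_neg h1, if_neg h2]]
        have hU3 : pvU (pre ++ [c]) false = pvU pre false := by rw [hU1, if_neg h1]; omega
        rw [if_neg hcond, hmap, hassoc, hlen1]
        have hih := ih (pre ++ [c])
        rw [hU3, hEsc] at hih
        exact hih

lemma pvFvS00 (l : List Char) : pvFvS l false false = pvFvK l 0 := by
  have h := pvFvS_eq_fvK l []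
  simpa [pvU, pvEscAfter] using h

lemma pvTokens_eq_none {l : List Char} (h : pvFvS l false false = none) :
    pvTokens l = [PySem.Chars.strip l] := by
  rw [pvTokens.eq_def]
  split <;> simp_all

lemma pvTokens_eq_some {l : List Char} {i : Nat} (h : pvFvS l false false = some i) :
    pvTokens l = PySem.Chars.strip (l.take i) :: pvTokens (l.drop (i + 1)) := by
  rw [pvTokens.eq_def]
  split <;> simp_all

lemma pvScanB_eq : ∀ (l : List Char) (inq : Bool) (prev cur : List Char),
    pvScanB l inq prev cur =
      match pvFvS l inq (decide (prev = ['\\'])) with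
      | none => [PySem.Chars.strip (cur.reverse ++ l)]
      | some i => PySem.Chars.strip (cur.reverse ++ l.take i)
          :: pvScanB (l.drop (i + 1)) false [';'] [] := by
  intro l
  induction l with
  | nil => intro inq prev cur; simp [pvScanB, pvFvS]
  | cons c r ih =>
    intro inq prev cur
    have hdec : ∀ c' : Char, decide (([c'] : List Char) = ['\\']) = decide (c' = '\\') := by
      intro c'; simp
    simp only [pvScanB]
    split_ifs with h1 h2
    · -- opening/closing quote
      rw [ih (!inq) [c] (c :: cur)]
      have hfs : pvFvS (c :: r) inq (decide (prev = ['\\']))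
          = (pvFvS r (!inq) (decide (c = '\\'))).map (· + 1) := by
        simp only [pvFvS]
        rw [if_pos ⟨h1.1, by simp [h1.2]⟩]
      rw [hfs, hdec]
      cases ho : pvFvS r (!inq) (decide (c = '\\')) with
      | none => simp
      | some i => simp [List.drop_succ_cons, List.take_succ_cons]
    · -- top-level ';' : cut here
      have hfs : pvFvS (c :: r) inq (decide (prev = ['\\'])) = some 0 := by
        simp only [pvFvS]
        rw [if_neg (by rintro ⟨hq, hd⟩; exact h1 ⟨hq, by simpa using hd⟩), if_pos h2]
      rw [hfs]
      simp [h2.1, h2.2]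
    · -- ordinary character
      rw [ih inq [c] (c :: cur)]
      have hfs : pvFvS (c :: r) inq (decide (prev = ['\\']))
          = (pvFvS r inq (decide (c = '\\'))).map (· + 1) := by
        simp only [pvFvS]
        rw [if_neg (by rintro ⟨hq, hd⟩; exact h1 ⟨hq, by simpa using hd⟩), if_neg h2]
      rw [hfs, hdec]
      cases ho : pvFvS r inq (decide (c = '\\')) with
      | none => simp
      | some i => simp [List.drop_succ_cons, List.take_succ_cons]

lemma pvScanB_tokens : ∀ (l : List Char) (prev : List Char), decide (prev = ['\\']) = false →
    pvScanB l false prev [] = pvTokens l := by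
  intro l
  induction l using pvTokens.induct with
  | case1 l h =>
    intro prev hprev
    rw [pvScanB_eq, hprev]
    simp only [h]
    simp [pvTokens_eq_none h]
  | case2 l i h ih =>
    intro prev hprev
    rw [pvScanB_eq, hprev]
    simp only [h]
    rw [pvTokens_eq_some h, ← ih [';'] (by simp)]
    simp

lemma pvParseparamA_cons (l : List Char) : pvParseparamA (';' :: l) = pvTokens l := by
  induction l using pvTokens.induct with
  | case1 l h =>
    rw [pvParseparamA]
    rw [if_pos (by rw [PySem.List.slice_to _ (by omega : (0:Int) ≤ 1)]; rfl)]
    rw [PySem.List.slice_from_one]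
    simp only [List.tail_cons]
    have hfind : PySem.Chars.find l [';'] = PySem.Chars.findFrom l [';'] ((0 : Nat) : Int) none := by
      rw [show (((0 : Nat) : Int)) = (0 : Int) from rfl, PySem.Chars.findFrom_zero]
    rw [hfind, pvInnerA_spec l (l.length + 1) 0 (by omega) (by omega)]
    rw [pvFvS00] at h
    rw [h]
    rw [show (match (none : Option Nat) with | none => (-1 : Int) | some i => (i : Int)) = -1
      from rfl]
    rw [if_pos (by omega)]
    rw [PySem.List.slice_to _ (by positivity), PySem.List.slice_from _ (by positivity)]
    simp only [Int.toNat_natCast, List.take_length, List.drop_length]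
    rw [pvTokens_eq_none (by rw [pvFvS00, h])]
    rw [pvParseparamA]
    rw [if_neg (by simp [PySem.List.slice])]
  | case2 l i h ih =>
    have hsome := pvFvS00 l ▸ h
    obtain ⟨-, hlt, hsemi, -⟩ := pvFvK_some l 0 i hsome
    rw [pvParseparamA]
    rw [if_pos (by rw [PySem.List.slice_to _ (by omega : (0:Int) ≤ 1)]; rfl)]
    rw [PySem.List.slice_from_one]
    simp only [List.tail_cons]
    have hfind : PySem.Chars.find l [';'] = PySem.Chars.findFrom l [';'] ((0 : Nat) : Int) none := by
      rw [show (((0 : Nat) : Int)) = (0 : Int) from rfl, PySem.Chars.findFrom_zero]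
    rw [hfind, pvInnerA_spec l (l.length + 1) 0 (by omega) (by omega)]
    rw [hsome]
    rw [show (match (some i : Option Nat) with | none => (-1 : Int) | some i => (i : Int)) = (i : Int)
      from rfl]
    rw [if_neg (by omega)]
    rw [PySem.List.slice_to _ (by positivity), PySem.List.slice_from _ (by positivity)]
    simp only [Int.toNat_natCast]
    have hdrop : l.drop i = ';' :: l.drop (i + 1) := by
      rw [List.drop_eq_getElem_cons hlt]
      congr 1
      simpa [List.getElem?_eq_getElem hlt] using hsemi
    rw [hdrop, ih, pvTokens_eq_some h]

-- ===== VERDICT (by name: the statement is the Claim_ definition above) =====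
theorem parse_header_py_spec : Claim_equal_parse_header_py := by
  intro line _
  unfold Spec_parse_header_py parse_header_py parse_header_py_alt
  rw [pvParseparamA_cons, pvScanB_tokens line.toList [] (by simp)]
  have hAB : pvOptsA = pvOptsB := rfl
  rw [hAB]
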